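-- pv_equiv track=rewrite | github.com/fudgeg/Group69-AgileWebProject | app/utils.py | get_user_media_identity
-- ===== SOURCE A (Python) =====
-- def get_user_media_identity(counts_dict):
--     if not counts_dict:
--         return "You are a Media Explorer"
--
--     max_count = max(counts_dict.values())
--     top_types = [k for k, v in counts_dict.items() if v == max_count]
--
--     if len(top_types) > 1:
--         return "You are a Media Explorer"
--
--     return {
--         'book': "You are a Reader",
--         'movie': "You are a Cinephile",
--         'music': "You are a Music Lover",
--         'tv_show': "You are a Binge-Watcher"
--     }.get(top_types[0], "You are a Media Explorer")
-- ===== SOURCE B (Python) =====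
-- _LABELS = {
--     'book': "You are a Reader",
--     'movie': "You are a Cinephile",
--     'music': "You are a Music Lover",
--     'tv_show': "You are a Binge-Watcher",
-- }
--
--
-- def get_user_media_identity(counts_dict):
--     # Single pass: track the current best (key, count) and whether the best
--     # count has been seen more than once.
--     best = None
--     tie = False
--     for k, v in counts_dict.items():
--         if best is None or v > best[1]:
--             best = (k, v)
--             tie = False
--         elif v == best[1]:
--             tie = True
--     if best is None or tie:
--         return "You are a Media Explorer"
--     return _LABELS.get(best[0], "You are a Media Explorer")
-- ===== Notes on version B (the rewrite author's own statement) =====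
-- stated objective: alternative
-- what changed: Replaces A's two scans over the dict (max over all values, then a filter collecting every key attaining it, then a length test) by a single left-to-right pass that maintains the current best (key, count) pair and a tie flag.
import Mathlib
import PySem

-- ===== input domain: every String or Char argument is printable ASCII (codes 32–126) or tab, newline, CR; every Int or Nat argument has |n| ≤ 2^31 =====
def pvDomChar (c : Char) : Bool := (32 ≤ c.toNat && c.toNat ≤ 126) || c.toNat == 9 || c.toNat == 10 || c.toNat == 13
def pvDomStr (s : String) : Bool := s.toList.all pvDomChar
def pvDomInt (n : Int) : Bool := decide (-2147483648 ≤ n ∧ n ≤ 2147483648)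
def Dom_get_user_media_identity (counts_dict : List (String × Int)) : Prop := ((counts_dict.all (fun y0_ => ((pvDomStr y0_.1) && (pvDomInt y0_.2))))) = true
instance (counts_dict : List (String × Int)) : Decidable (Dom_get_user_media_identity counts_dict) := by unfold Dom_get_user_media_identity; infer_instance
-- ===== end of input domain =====

-- B replaces A's two scans over the dict (max over the values, then a filter collecting the
-- keys that attain it) by a single left-to-right pass maintaining the current best (key, count)
-- and a tie flag; objective: alternative (one pass instead of two, same asymptotic cost).

-- the literal label dict both Pythons use ({'book': …}.get(k, default))
def pvLabels : PySem.Dict String String :=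
  PySem.Dict.ofList [("book", "You are a Reader"), ("movie", "You are a Cinephile"),
                     ("music", "You are a Music Lover"), ("tv_show", "You are a Binge-Watcher")]

-- ===== PORT A =====
def get_user_media_identity (counts_dict : List (String × Int)) : String :=
  if counts_dict = [] then "You are a Media Explorer"
  else
    match PySem.List.max? (counts_dict.map Prod.snd) (fun v => v) with
    | none => "You are a Media Explorer"   -- unreachable: counts_dict ≠ []
    | some max_count =>
      let top_types := (counts_dict.filter (fun kv => kv.2 == max_count)).map Prod.fst
      if 1 < top_types.length then "You are a Media Explorer"
      else
        match top_types with
        | [] => "You are a Media Explorer"  -- unreachable: max_count is attained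
        | k :: _ => PySem.Dict.getD pvLabels k "You are a Media Explorer"

-- ===== PORT B =====
def pvAltStep (st : Option (String × Int) × Bool) (kv : String × Int) :
    Option (String × Int) × Bool :=
  match st with
  | (none, _) => (some kv, false)
  | (some b, tie) =>
    if b.2 < kv.2 then (some kv, false)
    else if kv.2 == b.2 then (some b, true)
    else (some b, tie)

def get_user_media_identity_alt (counts_dict : List (String × Int)) : String :=
  match counts_dict.foldl pvAltStep (none, false) with
  | (none, _) => "You are a Media Explorer"
  | (some b, tie) =>
    if tie then "You are a Media Explorer"
    else PySem.Dict.getD pvLabels b.1 "You are a Media Explorer"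

-- ===== PRECONDITION & SPEC =====
def Spec_get_user_media_identity (counts_dict : List (String × Int)) (out : String) : Prop := out = get_user_media_identity_alt counts_dict
instance (counts_dict : List (String × Int)) (out : String) : Decidable (Spec_get_user_media_identity counts_dict out) := by unfold Spec_get_user_media_identity; infer_instance

-- ===== CLAIM (what is proved, stated in full; the proofs are below) =====
def Claim_equal_get_user_media_identity : Prop := ∀ (counts_dict : List (String × Int)), Dom_get_user_media_identity counts_dict → Spec_get_user_media_identity counts_dict (get_user_media_identity counts_dict)

-- ===== LEMMAS AND PROOFS =====

-- characterisation of B's loop, started from a non-empty best state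
lemma pvAltStep_foldl (l : List (String × Int)) (b : String × Int) (tie : Bool) :
    l.foldl pvAltStep (some b, tie) =
      (if b.2 < (l.map Prod.snd).foldl max b.2 then
        (l.find? (fun kv => kv.2 == (l.map Prod.snd).foldl max b.2),
         decide (2 ≤ (l.map Prod.snd).count ((l.map Prod.snd).foldl max b.2)))
      else
        (some b, tie || (l.map Prod.snd).contains b.2)) := by
  induction l generalizing b tie with
  | nil => simp
  | cons kv t ih =>
    have hstep : (kv :: t).foldl pvAltStep (some b, tie)
        = t.foldl pvAltStep (pvAltStep (some b, tie) kv) := rfl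
    rcases lt_trichotomy b.2 kv.2 with h | h | h
    · -- new max at kv
      have hM : ((kv :: t).map Prod.snd).foldl max b.2
          = (t.map Prod.snd).foldl max kv.2 := by
        simp [max_eq_right h.le]
      have hkM : kv.2 ≤ (t.map Prod.snd).foldl max kv.2 :=
        (PySem.List.le_foldl_max (t.map Prod.snd) kv.2).1
      have hbM : b.2 < (t.map Prod.snd).foldl max kv.2 := lt_of_lt_of_le h hkM
      have hstep2 : pvAltStep (some b, tie) kv = (some kv, false) := by
        simp [pvAltStep, h]
      rw [hstep, hstep2, ih, hM, if_pos hbM]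
      by_cases h2 : kv.2 < (t.map Prod.snd).foldl max kv.2
      · have hne : (kv.2 == (t.map Prod.snd).foldl max kv.2) = false := by
          simp [ne_of_lt h2]
        rw [if_pos h2, List.find?_cons_of_neg (by simpa using hne)]
        have : ((kv :: t).map Prod.snd).count ((t.map Prod.snd).foldl max kv.2)
            = (t.map Prod.snd).count ((t.map Prod.snd).foldl max kv.2) := by
          simp [ne_of_lt h2]
        rw [this]
      · have heq : kv.2 = (t.map Prod.snd).foldl max kv.2 := le_antisymm hkM (not_lt.mp h2)
        have hbe : (kv.2 == (t.map Prod.snd).foldl max kv.2) = true := by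
          simp only [beq_iff_eq]; exact heq
        rw [if_neg h2, List.find?_cons_of_pos (by simpa using hbe)]
        have hcnt : ((kv :: t).map Prod.snd).count ((t.map Prod.snd).foldl max kv.2)
            = (t.map Prod.snd).count ((t.map Prod.snd).foldl max kv.2) + 1 := by
          simp only [List.map_cons, List.count_cons, hbe, if_true]
        rw [hcnt]
        have hcc : (t.map Prod.snd).contains kv.2
            = (t.map Prod.snd).contains ((t.map Prod.snd).foldl max kv.2) :=
          congrArg _ heq
        have hb : (false || (t.map Prod.snd).contains kv.2)
            = decide (2 ≤ (t.map Prod.snd).count ((t.map Prod.snd).foldl max kv.2) + 1) := by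
          rw [Bool.false_or, hcc]
          by_cases hm : (t.map Prod.snd).foldl max kv.2 ∈ t.map Prod.snd
          · have h1 : 0 < (t.map Prod.snd).count ((t.map Prod.snd).foldl max kv.2) :=
              List.count_pos_iff.mpr hm
            have h2' : (t.map Prod.snd).contains ((t.map Prod.snd).foldl max kv.2) = true := by
              simpa using hm
            rw [h2', eq_comm, decide_eq_true_iff]
            omega
          · have h1 : (t.map Prod.snd).count ((t.map Prod.snd).foldl max kv.2) = 0 :=
              List.count_eq_zero.mpr hm
            have h2' : (t.map Prod.snd).contains ((t.map Prod.snd).foldl max kv.2) = false := by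
              simpa using hm
            rw [h2', h1, eq_comm, decide_eq_false_iff_not]
            omega
        rw [← hb]
    · -- equal value: tie becomes true
      have hM : ((kv :: t).map Prod.snd).foldl max b.2
          = (t.map Prod.snd).foldl max b.2 := by
        simp [max_eq_left h.ge]
      have hbM : b.2 ≤ (t.map Prod.snd).foldl max b.2 :=
        (PySem.List.le_foldl_max (t.map Prod.snd) b.2).1
      have hstep2 : pvAltStep (some b, tie) kv = (some b, true) := by
        simp [pvAltStep, h]
      rw [hstep, hstep2, ih, hM]
      by_cases h2 : b.2 < (t.map Prod.snd).foldl max b.2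
      · have hne : (kv.2 == (t.map Prod.snd).foldl max b.2) = false := by
          simp; omega
        rw [if_pos h2, if_pos h2, List.find?_cons_of_neg (by simpa using hne)]
        have : ((kv :: t).map Prod.snd).count ((t.map Prod.snd).foldl max b.2)
            = (t.map Prod.snd).count ((t.map Prod.snd).foldl max b.2) := by
          simp [List.count_cons]; omega
        rw [this]
      · rw [if_neg h2, if_neg h2]
        have hc : ((kv :: t).map Prod.snd).contains b.2 = true := by
          simp [h]
        rw [hc]
        simp
    · -- smaller value: state unchanged
      have hM : ((kv :: t).map Prod.snd).foldl max b.2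
          = (t.map Prod.snd).foldl max b.2 := by
        simp [max_eq_left h.le]
      have hbM : b.2 ≤ (t.map Prod.snd).foldl max b.2 :=
        (PySem.List.le_foldl_max (t.map Prod.snd) b.2).1
      have hstep2 : pvAltStep (some b, tie) kv = (some b, tie) := by
        have h1 : ¬ b.2 < kv.2 := by omega
        have h2 : (kv.2 == b.2) = false := by simp; omega
        simp [pvAltStep, h1, h2]
      rw [hstep, hstep2, ih, hM]
      by_cases h2 : b.2 < (t.map Prod.snd).foldl max b.2
      · have hne : (kv.2 == (t.map Prod.snd).foldl max b.2) = false := by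
          simp; omega
        rw [if_pos h2, if_pos h2, List.find?_cons_of_neg (by simpa using hne)]
        have : ((kv :: t).map Prod.snd).count ((t.map Prod.snd).foldl max b.2)
            = (t.map Prod.snd).count ((t.map Prod.snd).foldl max b.2) := by
          simp [List.count_cons]; omega
        rw [this]
      · rw [if_neg h2, if_neg h2]
        have hc : ((kv :: t).map Prod.snd).contains b.2 = (t.map Prod.snd).contains b.2 := by
          have : (b.2 == kv.2) = false := by simp; omega
          simp [List.map_cons, this]
        rw [hc]

-- Python's max(xs) with no key, first match, counts vs filters
lemma pv_find_eq_head_filter {α : Type} (p : α → Bool) (l : List α) :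
    l.find? p = (l.filter p).head? := by
  induction l with
  | nil => rfl
  | cons x t ih =>
    by_cases h : p x
    · rw [List.find?_cons_of_pos h, List.filter_cons_of_pos h, List.head?_cons]
    · rw [List.find?_cons_of_neg (by simp [h]), List.filter_cons_of_neg (by simp [h]), ih]

lemma pv_count_snd (l : List (String × Int)) (m : Int) :
    (l.map Prod.snd).count m = (l.filter (fun kv => kv.2 == m)).length := by
  induction l with
  | nil => rfl
  | cons kv t ih =>
    rw [List.map_cons, List.count_cons, List.filter_cons]
    by_cases h : kv.2 = m
    · simp only [h]
      simp [ih]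
    · have : (kv.2 == m) = false := by simp [h]
      simp [this, ih]

lemma pv_main (l : List (String × Int)) :
    get_user_media_identity l = get_user_media_identity_alt l := by
  cases l with
  | nil => rfl
  | cons kv t =>
    have halt : get_user_media_identity_alt (kv :: t)
        = (match t.foldl pvAltStep (some kv, false) with
           | (none, _) => "You are a Media Explorer"
           | (some b, tie) =>
             if tie then "You are a Media Explorer"
             else PySem.Dict.getD pvLabels b.1 "You are a Media Explorer") := rfl
    rw [halt, pvAltStep_foldl]
    have hkM : kv.2 ≤ (t.map Prod.snd).foldl max kv.2 :=
      (PySem.List.le_foldl_max (t.map Prod.snd) kv.2).1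
    have hA : get_user_media_identity (kv :: t)
        = (let top := ((kv :: t).filter
              (fun kv' => kv'.2 == (t.map Prod.snd).foldl max kv.2)).map Prod.fst
           if 1 < top.length then "You are a Media Explorer"
           else
             match top with
             | [] => "You are a Media Explorer"
             | k :: _ => PySem.Dict.getD pvLabels k "You are a Media Explorer") := by
      unfold get_user_media_identity
      rw [if_neg (by simp), List.map_cons, PySem.List.max?_id_cons]
    rw [hA]
    by_cases hlt : kv.2 < (t.map Prod.snd).foldl max kv.2
    · -- the max lives in the tail: kv is filtered out / skipped on both sides
      rw [if_pos hlt]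
      have hmem : (t.map Prod.snd).foldl max kv.2 ∈ t.map Prod.snd := by
        rcases PySem.List.foldl_max_mem (t.map Prod.snd) kv.2 with h | h
        · omega
        · exact h
      have hne : (kv.2 == (t.map Prod.snd).foldl max kv.2) = false := by
        simp [ne_of_lt hlt]
      have hcnt : (t.map Prod.snd).count ((t.map Prod.snd).foldl max kv.2)
          = (t.filter (fun kv' => kv'.2 == (t.map Prod.snd).foldl max kv.2)).length :=
        pv_count_snd t _
      have hpos : 0 < (t.filter (fun kv' => kv'.2 == (t.map Prod.snd).foldl max kv.2)).length := by
        rw [← hcnt]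
        exact List.count_pos_iff.mpr hmem
      obtain ⟨f0, rest, hfil⟩ :
          ∃ f0 rest, t.filter (fun kv' => kv'.2 == (t.map Prod.snd).foldl max kv.2) = f0 :: rest := by
        cases hf : t.filter (fun kv' => kv'.2 == (t.map Prod.snd).foldl max kv.2) with
        | nil => rw [hf] at hpos; simp at hpos
        | cons a b => exact ⟨a, b, rfl⟩
      rw [List.filter_cons_of_neg (by simpa using hne)]
      rw [pv_find_eq_head_filter, hfil]
      simp only [List.head?_cons, List.map_cons, List.length_cons, List.length_map, hcnt, hfil]
      by_cases h2 : 2 ≤ rest.length + 1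
      · rw [if_pos (by omega), if_pos (by simpa using h2)]
      · have hr : rest.length = 0 := by omega
        rw [if_neg (by omega), if_neg (by simpa using h2)]
    · -- kv itself carries the max
      have heq : kv.2 = (t.map Prod.snd).foldl max kv.2 := le_antisymm hkM (not_lt.mp hlt)
      have hbe : (kv.2 == (t.map Prod.snd).foldl max kv.2) = true := by
        simp only [beq_iff_eq]; exact heq
      rw [if_neg hlt, List.filter_cons_of_pos (by simpa using hbe)]
      have hcnt : (t.map Prod.snd).count ((t.map Prod.snd).foldl max kv.2)
          = (t.filter (fun kv' => kv'.2 == (t.map Prod.snd).foldl max kv.2)).length :=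
        pv_count_snd t _
      have hcc : (t.map Prod.snd).contains kv.2
          = (t.map Prod.snd).contains ((t.map Prod.snd).foldl max kv.2) :=
        congrArg _ heq
      by_cases hm : (t.map Prod.snd).foldl max kv.2 ∈ t.map Prod.snd
      · -- a second element attains the max: both sides say Explorer
        have h1 : 0 < (t.filter (fun kv' => kv'.2 == (t.map Prod.snd).foldl max kv.2)).length := by
          rw [← hcnt]; exact List.count_pos_iff.mpr hm
        have hct : (t.map Prod.snd).contains kv.2 = true := by
          rw [hcc]; simpa using hm
        rw [hct]
        simp only [List.map_cons, List.length_cons, List.length_map, Bool.or_true, if_true]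
        rw [if_pos (by omega)]
      · -- kv is the unique max
        have h1 : (t.filter (fun kv' => kv'.2 == (t.map Prod.snd).foldl max kv.2)).length = 0 := by
          rw [← hcnt]; exact List.count_eq_zero.mpr hm
        have hnil : t.filter (fun kv' => kv'.2 == (t.map Prod.snd).foldl max kv.2) = [] :=
          List.length_eq_zero_iff.mp h1
        have hct : (t.map Prod.snd).contains kv.2 = false := by
          rw [hcc]; simpa using hm
        rw [hct, hnil]
        simp

-- ===== VERDICT (by name: the statement is the Claim_ definition above) =====
theorem get_user_media_identity_spec : Claim_equal_get_user_media_identity := by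
  intro counts_dict _
  unfold Spec_get_user_media_identity
  exact pv_main counts_dict
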